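-- pv_equiv track=rewrite | github.com/atomicgamedeveloper/DTaaS | script/docs/format_tables.py | find_tables
-- ===== SOURCE A (Python) =====
-- from dataclasses import dataclass
--
-- @dataclass
-- class _TableState:
--     """State for tracking table boundaries during parsing."""
--
--     in_table: bool = False
--     start_line: int = 0
--
-- def _is_table_row(line: str) -> bool:
--     """Check if a line is part of a markdown table."""
--     return "|" in line and line.strip().startswith("|")
--
-- def find_tables(content: str) -> list[tuple[int, int]]:
--     """Find all table ranges in markdown content.
--
--     Returns:
--         List of (start_line, end_line) tuples (0-indexed)
--     """
--     lines = content.split("\n")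
--     tables = []
--     state = _TableState()
--
--     for i, line in enumerate(lines):
--         is_table = _is_table_row(line)
--
--         if is_table and not state.in_table:
--             state.in_table = True
--             state.start_line = i
--         elif not is_table and state.in_table:
--             tables.append((state.start_line, i - 1))
--             state.in_table = False
--
--     if state.in_table:
--         tables.append((state.start_line, len(lines) - 1))
--
--     return tables
-- ===== SOURCE B (Python) =====
-- def _is_table_row(line: str) -> bool:
--     """Check if a line is part of a markdown table."""
--     return "|" in line and line.strip().startswith("|")
--
--
-- def find_tables(content: str) -> list[tuple[int, int]]:
--     """Find all table ranges in markdown content.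
--
--     Boundary matching: detect each run START (table line whose predecessor is
--     not one) and each run END (table line whose successor is not one)
--     independently by comparing the flag sequence with its shifted copies, then
--     pair the k-th start with the k-th end.
--     """
--     flags = [_is_table_row(line) for line in content.split("\n")]
--     starts = [i for i, (prev, cur) in enumerate(zip([False] + flags, flags)) if cur and not prev]
--     ends = [i for i, (cur, nxt) in enumerate(zip(flags, flags[1:] + [False])) if cur and not nxt]
--     return list(zip(starts, ends))
-- ===== Notes on version B (the rewrite author's own statement) =====
-- stated objective: alternative
-- what changed: Replaced the carried-state run scan by boundary matching: starts (table line whose predecessor is not one) and ends (table line whose successor is not one) are detected independently by zipping the flag sequence with its shifted copies, and the k-th start is paired with the k-th end.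
import Mathlib
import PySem

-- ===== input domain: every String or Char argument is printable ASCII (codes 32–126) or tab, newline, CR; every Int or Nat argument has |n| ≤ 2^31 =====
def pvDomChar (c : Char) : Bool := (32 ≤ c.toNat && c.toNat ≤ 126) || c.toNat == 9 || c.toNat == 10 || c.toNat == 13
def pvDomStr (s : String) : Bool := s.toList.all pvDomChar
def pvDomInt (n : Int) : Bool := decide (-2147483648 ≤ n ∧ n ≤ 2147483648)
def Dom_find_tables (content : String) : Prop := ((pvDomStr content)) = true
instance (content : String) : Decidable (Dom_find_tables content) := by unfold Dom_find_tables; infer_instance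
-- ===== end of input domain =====

-- B replaces A's carried-state run scan by boundary matching: run starts and run
-- ends are detected independently from shifted flag sequences and paired up;
-- same cost, no speed claim.

-- ===== PORT A =====
-- _is_table_row: '"|" in line and line.strip().startswith("|")'
def isTableRow (line : String) : Bool :=
  PySem.Str.isIn "|" line && PySem.Str.startswith (PySem.Str.strip line) "|"

-- the 'for i, line in enumerate(lines)' loop carrying (tables, in_table, start_line)
def findTablesLoop : Int → List String → List (Int × Int) → Bool → Int → (List (Int × Int) × Bool × Int)
  | _, [], tables, inT, s => (tables, inT, s)
  | i, line :: rest, tables, inT, s =>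
    let isT := isTableRow line
    if isT && !inT then findTablesLoop (i + 1) rest tables true i
    else if !isT && inT then findTablesLoop (i + 1) rest (tables ++ [(s, i - 1)]) false s
    else findTablesLoop (i + 1) rest tables inT s

-- content.split("\n"): sep is the literal nonempty "\n", so split? is some; getD unwraps it
def find_tables (content : String) : List (Int × Int) :=
  let lines := (PySem.Str.split? content "\n").getD []
  match findTablesLoop 0 lines [] false 0 with
  | (tables, inT, s) =>
    if inT then tables ++ [(s, (lines.length : Int) - 1)] else tables

-- ===== PORT B =====
-- starts = [i for i,(prev,cur) in enumerate(zip([False]+flags, flags)) if cur and not prev]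
-- ends   = [i for i,(cur,nxt) in enumerate(zip(flags, flags[1:]+[False])) if cur and not nxt]
def find_tables_alt (content : String) : List (Int × Int) :=
  let flags := ((PySem.Str.split? content "\n").getD []).map isTableRow
  let starts := (PySem.List.enumerate (List.zip (false :: flags) flags) 0).filterMap
      (fun p => if p.2.2 && !p.2.1 then some p.1 else none)
  let ends := (PySem.List.enumerate (List.zip flags (flags.drop 1 ++ [false])) 0).filterMap
      (fun p => if p.2.1 && !p.2.2 then some p.1 else none)
  List.zip starts ends

-- ===== PRECONDITION & SPEC =====
def Spec_find_tables (content : String) (out : List (Int × Int)) : Prop := out = find_tables_alt content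
instance (content : String) (out : List (Int × Int)) : Decidable (Spec_find_tables content out) := by unfold Spec_find_tables; infer_instance

-- ===== CLAIM (what is proved, stated in full; the proofs are below) =====
def Claim_equal_find_tables : Prop := ∀ (content : String), Dom_find_tables content → Spec_find_tables content (find_tables content)

-- ===== LEMMAS AND PROOFS =====

-- A's loop result followed by the post-loop flush at end index i + len(lines)
def flushLoop (i : Int) (lines : List String) (tables : List (Int × Int)) (inT : Bool) (s : Int) : List (Int × Int) :=
  let p := findTablesLoop i lines tables inT s
  if p.2.1 then p.1 ++ [(p.2.2, i + (lines.length : Int) - 1)] else p.1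

theorem flushLoop_nil (i : Int) (tables : List (Int × Int)) (inT : Bool) (s : Int) :
    flushLoop i [] tables inT s = if inT then tables ++ [(s, i - 1)] else tables := by
  simp [flushLoop, findTablesLoop]

theorem flushLoop_cons (i : Int) (line : String) (rest : List String)
    (tables : List (Int × Int)) (inT : Bool) (s : Int) :
    flushLoop i (line :: rest) tables inT s =
      if isTableRow line && !inT then flushLoop (i + 1) rest tables true i
      else if !(isTableRow line) && inT then flushLoop (i + 1) rest (tables ++ [(s, i - 1)]) false s
      else flushLoop (i + 1) rest tables inT s := by
  have hlen : i + ((line :: rest).length : Int) - 1 = (i + 1) + (rest.length : Int) - 1 := by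
    simp only [List.length_cons]; push_cast; ring
  unfold flushLoop
  rw [findTablesLoop, hlen]
  split_ifs <;> rfl

-- start indices of True runs in a flag list, given the previous flag
def startsOf : Bool → Int → List Bool → List Int
  | _, _, [] => []
  | prev, i, c :: fs => (if c && !prev then [i] else []) ++ startsOf c (i + 1) fs

-- end indices of True runs in a flag list (an end = True flag with non-True successor)
def endsOf : Int → List Bool → List Int
  | _, [] => []
  | i, c :: fs => (if c && !(fs.headD false) then [i] else []) ++ endsOf (i + 1) fs

-- the pending end carried while inside a run: closes at i-1 unless the next flag continues
def pendEnd (i : Int) (flags : List Bool) : List Int :=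
  if flags.headD false then [] else [i - 1]

theorem starts_filterMap (flags : List Bool) (prev : Bool) (i : Int) :
    (PySem.List.enumerate (List.zip (prev :: flags) flags) i).filterMap
        (fun p => if p.2.2 && !p.2.1 then some p.1 else none) =
      startsOf prev i flags := by
  induction flags generalizing prev i with
  | nil => simp [startsOf]
  | cons c fs ih =>
    rw [List.zip_cons_cons, PySem.List.enumerate_cons, List.filterMap_cons, ih c (i + 1),
      startsOf]
    by_cases h : (c && !prev) = true <;> simp [h]

theorem ends_filterMap (flags : List Bool) (i : Int) :
    (PySem.List.enumerate (List.zip flags (flags.drop 1 ++ [false])) i).filterMap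
        (fun p => if p.2.1 && !p.2.2 then some p.1 else none) =
      endsOf i flags := by
  induction flags generalizing i with
  | nil => simp [endsOf]
  | cons c fs ih =>
    cases fs with
    | nil => simp [endsOf]; by_cases h : c = true <;> simp [h]
    | cons d ds =>
      rw [List.drop_one, List.tail_cons, List.cons_append, List.zip_cons_cons,
        PySem.List.enumerate_cons, List.filterMap_cons]
      have h2 := ih (i := i + 1)
      rw [List.drop_one, List.tail_cons] at h2
      rw [endsOf, ← h2]
      by_cases h : (c && !d) = true <;> simp [h]

-- endsOf peeling a True head produces exactly the pending end for the tail
theorem endsOf_true_cons (i : Int) (fs : List Bool) :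
    endsOf i (true :: fs) = pendEnd (i + 1) fs ++ endsOf (i + 1) fs := by
  cases fs with
  | nil => simp [endsOf, pendEnd]
  | cons d ds => cases d <;> simp [endsOf, pendEnd]

-- A's flushed loop equals the zip of starts and ends, in both loop states
theorem loop_eq_zip (lines : List String) :
    (∀ (i : Int) (tables : List (Int × Int)) (s : Int),
      flushLoop i lines tables false s =
        tables ++ List.zip (startsOf false i (lines.map isTableRow)) (endsOf i (lines.map isTableRow))) ∧
    (∀ (i : Int) (tables : List (Int × Int)) (s : Int),
      flushLoop i lines tables true s =
        tables ++ List.zip (s :: startsOf true i (lines.map isTableRow))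
          (pendEnd i (lines.map isTableRow) ++ endsOf i (lines.map isTableRow))) := by
  induction lines with
  | nil =>
    constructor <;> intro i tables s <;>
      simp [flushLoop_nil, startsOf, endsOf, pendEnd]
  | cons line rest ih =>
    obtain ⟨ihF, ihT⟩ := ih
    constructor <;> intro i tables s <;> rw [flushLoop_cons] <;> cases h : isTableRow line
    · -- not in table, flag false
      simp [h, ihF, List.map_cons, startsOf, endsOf]
    · -- not in table, flag true: run opens at i
      simp only [h, Bool.not_false, Bool.and_true, if_true, List.map_cons]
      rw [ihT (i + 1) tables i, startsOf, endsOf_true_cons]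
      simp
    · -- in table, flag false: run closes at i - 1
      simp only [h, Bool.false_and, Bool.not_false, Bool.true_and, if_true, List.map_cons]
      rw [ihF (i + 1) (tables ++ [(s, i - 1)]) s]
      simp [startsOf, endsOf, pendEnd, List.zip_cons_cons, List.append_assoc]
    · -- in table, flag true: run continues
      simp only [h, Bool.not_true, Bool.and_false, Bool.false_and, Bool.false_eq_true,
        if_false, List.map_cons]
      rw [ihT (i + 1) tables s, startsOf, endsOf_true_cons]
      simp [pendEnd]

-- ===== VERDICT (by name: the statement is the Claim_ definition above) =====
theorem find_tables_spec : Claim_equal_find_tables := by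
  intro content _
  unfold Spec_find_tables
  have h := (loop_eq_zip ((PySem.Str.split? content "\n").getD [])).1 0 [] 0
  unfold flushLoop at h
  simp only [zero_add] at h
  simp only [find_tables, find_tables_alt]
  rw [starts_filterMap, ends_filterMap]
  simpa using h
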